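-- pv_equiv track=rewrite | github.com/pypi-data/pypi-mirror-354 | packages/pyc3l-cli/pyc3l_cli-0.5.0.tar.gz/pyc3l_cli-0.5.0/src/pyc3l_cli/cmd/report.py | ranges_intersection_2
-- ===== SOURCE A (Python) =====
-- def ranges_intersection_2(ranges1, ranges2):
--     """Return the smallest range intersection of the given ranges
--
--     >>> ranges_intersection_2([(1, 5)], [(1, 5)])
--     [(1, 5)]
--     >>> ranges_intersection_2([(1, 5)], [(6, 10)])
--     []
--     >>> ranges_intersection_2([(1, 5)], [(3, 10)])
--     [(3, 5)]
--     >>> ranges_intersection_2([(1, 5)], [(5, 7)])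
--     [(5, 5)]
--     >>> ranges_intersection_2([(1, 5)], [(6, 7)])
--     []
--     >>> ranges_intersection_2([], [(6, 7)])
--     []
--     >>> ranges_intersection_2([], [])
--     []
--     >>> ranges_intersection_2([(1, 5), (7, 10)], [(3, 10)])
--     [(3, 5), (7, 10)]
--
--     """
--     intersection = []
--     for r1 in ranges1:
--         for r2 in ranges2:
--             if r1[1] < r2[0] or r1[0] > r2[1]:
--                 continue
--             intersection.append((max(r1[0], r2[0]), min(r1[1], r2[1])))
--     return intersection
-- ===== SOURCE B (Python) =====
-- def ranges_intersection_2(ranges1, ranges2):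
--     # Sort ranges2 once by start, keeping original indices.
--     by_start = sorted(enumerate(ranges2), key=lambda t: t[1][0])
--     out = []
--     for a, b in ranges1:
--         hits = []
--         for i, (c, d) in by_start:
--             if c > b:
--                 break  # every later start is >= c > b: no more overlaps
--             if a <= d:
--                 hits.append((i, (max(a, c), min(b, d))))
--         hits.sort(key=lambda t: t[0])  # restore original ranges2 order
--         out.extend(p for _, p in hits)
--     return out
-- ===== Notes on version B (the rewrite author's own statement) =====
-- stated objective: alternative
-- what changed: B sorts ranges2 once by start with original indices, scans the sorted list per r1 with an early break once starts exceed r1's end, and restores ranges2 order by sorting the hits on index, instead of A's unconditional all-pairs overlap test.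
import Mathlib
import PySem

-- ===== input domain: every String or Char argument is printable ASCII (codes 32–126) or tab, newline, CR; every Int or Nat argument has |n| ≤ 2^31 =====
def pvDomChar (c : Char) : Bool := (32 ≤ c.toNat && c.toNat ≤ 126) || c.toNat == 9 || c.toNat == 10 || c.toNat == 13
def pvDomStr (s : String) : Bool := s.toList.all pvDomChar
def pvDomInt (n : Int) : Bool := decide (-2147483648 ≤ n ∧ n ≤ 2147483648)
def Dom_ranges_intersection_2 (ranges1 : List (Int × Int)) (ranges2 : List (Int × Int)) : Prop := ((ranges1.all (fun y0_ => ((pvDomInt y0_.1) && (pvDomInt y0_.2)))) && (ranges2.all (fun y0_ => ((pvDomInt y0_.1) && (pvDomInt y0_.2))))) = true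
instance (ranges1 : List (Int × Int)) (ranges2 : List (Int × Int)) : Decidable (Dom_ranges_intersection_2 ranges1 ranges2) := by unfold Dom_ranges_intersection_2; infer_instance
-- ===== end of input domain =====

-- B: sort ranges2 once by start with original indices, scan it per r1 breaking at the first
-- start beyond r1's end, restore ranges2 order by sorting hits on index; alternative structure, same results.
-- ===== PORT A =====
def ranges_intersection_2 (ranges1 : List (Int × Int)) (ranges2 : List (Int × Int)) : List (Int × Int) :=
  ranges1.foldl (fun intersection r1 =>
    ranges2.foldl (fun intersection r2 =>
      if r1.2 < r2.1 ∨ r1.1 > r2.2 then intersection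
      else intersection ++ [(max r1.1 r2.1, min r1.2 r2.2)]) intersection) []

-- ===== PORT B =====
-- B's inner loop over the sorted list: break on c > b, else collect (i, clip) when a <= d
def pvScan (a b : Int) (hits : List (Int × (Int × Int))) : List (Int × (Int × Int)) → List (Int × (Int × Int))
  | [] => hits
  | t :: rest =>
      if t.2.1 > b then hits
      else if a ≤ t.2.2 then pvScan a b (hits ++ [(t.1, (max a t.2.1, min b t.2.2))]) rest
      else pvScan a b hits rest

def ranges_intersection_2_alt (ranges1 : List (Int × Int)) (ranges2 : List (Int × Int)) : List (Int × Int) :=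
  let byStart := PySem.List.sorted (PySem.List.enumerate ranges2) (fun t => t.2.1) false
  ranges1.foldl (fun out r1 =>
    out ++ (PySem.List.sorted (pvScan r1.1 r1.2 [] byStart) (fun t => t.1) false).map (fun t => t.2)) []

-- ===== PRECONDITION & SPEC =====
def Spec_ranges_intersection_2 (ranges1 : List (Int × Int)) (ranges2 : List (Int × Int)) (out : List (Int × Int)) : Prop := out = ranges_intersection_2_alt ranges1 ranges2
instance (ranges1 : List (Int × Int)) (ranges2 : List (Int × Int)) (out : List (Int × Int)) : Decidable (Spec_ranges_intersection_2 ranges1 ranges2 out) := by unfold Spec_ranges_intersection_2; infer_instance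

-- ===== CLAIM (what is proved, stated in full; the proofs are below) =====
def Claim_equal_ranges_intersection_2 : Prop := ∀ (ranges1 : List (Int × Int)) (ranges2 : List (Int × Int)), Dom_ranges_intersection_2 ranges1 ranges2 → Spec_ranges_intersection_2 ranges1 ranges2 (ranges_intersection_2 ranges1 ranges2)

-- ===== LEMMAS AND PROOFS =====
-- the overlap of r1 with r2 as an Option (A's inner-loop contribution)
def pvHit (r1 r2 : Int × Int) : Option (Int × Int) :=
  if r1.2 < r2.1 ∨ r1.1 > r2.2 then none else some (max r1.1 r2.1, min r1.2 r2.2)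

-- B's hit test / clip on an indexed range
def pvP (a b : Int) (t : Int × (Int × Int)) : Bool := t.2.1 ≤ b ∧ a ≤ t.2.2
def pvG (a b : Int) (t : Int × (Int × Int)) : Int × (Int × Int) :=
  (t.1, (max a t.2.1, min b t.2.2))

theorem pvA_inner (r1 : Int × Int) (rs : List (Int × Int)) (acc : List (Int × Int)) :
    rs.foldl (fun intersection r2 =>
      if r1.2 < r2.1 ∨ r1.1 > r2.2 then intersection
      else intersection ++ [(max r1.1 r2.1, min r1.2 r2.2)]) acc
    = acc ++ rs.filterMap (pvHit r1) := by
  induction rs generalizing acc with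
  | nil => simp
  | cons r2 t ih =>
    rw [List.foldl_cons]
    split_ifs with h
    · rw [ih]; simp [pvHit, h]
    · rw [ih]; simp [pvHit, h]

theorem pvA_outer (rs1 rs2 : List (Int × Int)) (acc : List (Int × Int)) :
    rs1.foldl (fun intersection r1 =>
      rs2.foldl (fun intersection r2 =>
        if r1.2 < r2.1 ∨ r1.1 > r2.2 then intersection
        else intersection ++ [(max r1.1 r2.1, min r1.2 r2.2)]) intersection) acc
    = acc ++ rs1.flatMap (fun r1 => rs2.filterMap (pvHit r1)) := by
  induction rs1 generalizing acc with
  | nil => simp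
  | cons r1 t ih => rw [List.foldl_cons, pvA_inner, ih]; simp [List.flatMap_def]

-- pvScan on a list sorted by start is filter-then-clip
theorem pvScan_eq (a b : Int) (l : List (Int × (Int × Int))) (acc : List (Int × (Int × Int)))
    (hs : l.Pairwise (fun u v => u.2.1 ≤ v.2.1)) :
    pvScan a b acc l = acc ++ (l.filter (pvP a b)).map (pvG a b) := by
  induction l generalizing acc with
  | nil => simp [pvScan]
  | cons t rest ih =>
    rw [List.pairwise_cons] at hs
    rw [pvScan]
    split_ifs with h1 h2
    · -- break: nothing in t :: rest satisfies pvP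
      have : (t :: rest).filter (pvP a b) = [] := by
        rw [List.filter_eq_nil_iff]
        intro u hu
        rcases List.mem_cons.mp hu with rfl | hu
        · simp [pvP]; omega
        · have := hs.1 u hu; simp [pvP]; omega
      simp [this]
    · rw [ih _ hs.2, List.filter_cons_of_pos (by simp [pvP]; omega)]
      simp [pvG]
    · rw [ih _ hs.2, List.filter_cons_of_neg (by simp [pvP]; omega)]

-- erasing the enumerate layer: filtered clipped indexed ranges project to A's filterMap
theorem pvErase (a b : Int) (xs : List (Int × Int)) (s : Int) :
    ((PySem.List.enumerate xs s).filter (pvP a b)).map (fun t => (pvG a b t).2)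
    = xs.filterMap (pvHit (a, b)) := by
  induction xs generalizing s with
  | nil => simp [PySem.List.enumerate_nil]
  | cons x t ih =>
    rw [PySem.List.enumerate_cons, List.filterMap_cons]
    by_cases h : x.1 ≤ b ∧ a ≤ x.2
    · rw [List.filter_cons_of_pos (by simp [pvP]; omega)]
      simp only [List.map_cons, ih]
      simp [pvHit, pvG, show ¬(b < x.1 ∨ a > x.2) by omega]
    · rw [List.filter_cons_of_neg (by simp [pvP]; omega), ih]
      simp [pvHit, show b < x.1 ∨ a > x.2 by omega]

-- B's per-r1 result equals A's per-r1 result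
theorem pvB_per_r1 (a b : Int) (rs2 : List (Int × Int)) :
    (PySem.List.sorted
        (pvScan a b [] (PySem.List.sorted (PySem.List.enumerate rs2) (fun t => t.2.1) false))
        (fun t => t.1) false).map (fun t => t.2)
    = rs2.filterMap (pvHit (a, b)) := by
  set byStart := PySem.List.sorted (PySem.List.enumerate rs2) (fun t => t.2.1) false with hb
  have hpair : byStart.Pairwise (fun u v => u.2.1 ≤ v.2.1) :=
    PySem.List.sorted_pairwise (key := fun t => t.2.1) (xs := PySem.List.enumerate rs2)
  rw [pvScan_eq a b byStart [] hpair, List.nil_append]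
  set E := ((PySem.List.enumerate rs2).filter (pvP a b)).map (pvG a b) with hE
  have hperm : E.Perm ((byStart.filter (pvP a b)).map (pvG a b)) := by
    exact (((PySem.List.sorted_perm (PySem.List.enumerate rs2)
      (fun t => t.2.1) false).filter (pvP a b)).map (pvG a b)).symm
  have hEpair : E.Pairwise (fun u v => u.1 < v.1) := by
    rw [hE, List.pairwise_map]
    have : ((PySem.List.enumerate rs2).filter (pvP a b)).Pairwise (fun u v => u.1 < v.1) :=
      (PySem.List.pairwise_lt_enumerate rs2 0).sublist List.filter_sublist
    exact this.imp (by intro u v h; simpa [pvG] using h)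
  rw [PySem.List.sorted_eq_of_perm_of_pairwise_lt ((byStart.filter (pvP a b)).map (pvG a b)) E
    (fun t => t.1) hperm hEpair]
  rw [hE, List.map_map]
  exact pvErase a b rs2 0

-- ===== VERDICT (by name: the statement is the Claim_ definition above) =====
theorem ranges_intersection_2_spec : Claim_equal_ranges_intersection_2 := by
  intro rs1 rs2 _
  unfold Spec_ranges_intersection_2 ranges_intersection_2 ranges_intersection_2_alt
  rw [pvA_outer]
  rw [PySem.List.foldl_congr_mem' rs1 _
      (fun out r1 => out ++ rs2.filterMap (pvHit r1)) []
      (by intro r1 _ acc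
          simp only []
          rw [pvB_per_r1 r1.1 r1.2 rs2])]
  rw [PySem.List.foldl_append_eq_flatMap]
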